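-- pv_equiv track=rewrite | github.com/Steven-ZhangJM/CS263_Final_Project | best_solution_gpt/p085.py | find_nearest_area
-- ===== SOURCE A (Python) =====
-- def count_rectangles(w, h):
--     return (w * (w + 1) * h * (h + 1)) // 4
--
-- def find_nearest_area(target):
--     min_diff = float('inf')
--     nearest_area = 0
--     for w in range(1, 100):
--         for h in range(1, 100):
--             rect_count = count_rectangles(w, h)
--             diff = abs(rect_count - target)
--             if diff < min_diff:
--                 min_diff = diff
--                 nearest_area = w * h
--     return nearest_area
-- ===== SOURCE B (Python) =====
-- def find_nearest_area(target):
--     best_diff = None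
--     best_area = 0
--     for w in range(1, 100):
--         tw = w * (w + 1) // 2
--         # smallest h in [1,99] with tw*T(h) >= target; 99 if even h=99 undershoots
--         if tw * 4950 < target:
--             h0 = 99
--         else:
--             lo, hi = 1, 99
--             while lo < hi:
--                 mid = (lo + hi) // 2
--                 if target <= tw * (mid * (mid + 1) // 2):
--                     hi = mid
--                 else:
--                     lo = mid + 1
--             h0 = lo
--         for h in ([h0] if h0 == 1 else [h0 - 1, h0]):
--             diff = abs(tw * (h * (h + 1) // 2) - target)
--             if best_diff is None or diff < best_diff:
--                 best_diff = diff
--                 best_area = w * h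
--     return best_area
-- ===== Notes on version B (the rewrite author's own statement) =====
-- stated objective: alternative
-- what changed: For each width w, the inner linear scan over all candidate heights is replaced by a binary search for the crossover height (the smallest one whose rectangle count reaches target), after which only the one or two straddling heights are compared, with strict-< updates preserving A's first-win tie-breaking.
import Mathlib
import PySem

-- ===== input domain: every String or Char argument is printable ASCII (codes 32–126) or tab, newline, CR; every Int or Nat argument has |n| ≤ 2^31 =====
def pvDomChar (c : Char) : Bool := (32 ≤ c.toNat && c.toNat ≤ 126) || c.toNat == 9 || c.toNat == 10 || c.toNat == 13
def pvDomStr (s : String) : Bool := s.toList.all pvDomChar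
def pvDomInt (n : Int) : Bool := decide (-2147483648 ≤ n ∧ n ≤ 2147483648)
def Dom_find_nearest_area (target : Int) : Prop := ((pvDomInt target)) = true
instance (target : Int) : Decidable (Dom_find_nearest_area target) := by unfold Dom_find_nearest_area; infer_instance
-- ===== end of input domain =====

-- B replaces A's inner linear scan over h by a binary search for the crossover h
-- (the smallest h whose count reaches target), examining only the one or two
-- straddling h values per w; objective: alternative (fewer update steps per w).

-- ===== PORT A =====
-- float('inf') sentinel is ported as `none` (`diff < float('inf')` is always
-- true in Python, matched by the `none` branch always updating).
def count_rectangles (w h : Int) : Int :=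
  PySem.Int.floordiv (w * (w + 1) * h * (h + 1)) 4

-- outer `for w` loop: min_diff / nearest_area threaded as parameters
def find_nearest_area_loop (target : Int) : List Int → Option Int → Int → Int
  | [], _, nearest_area => nearest_area
  | w :: ws, min_diff, nearest_area =>
      let st := (PySem.List.pyRange 1 100 1).foldl (fun s h =>
          let rect_count := count_rectangles w h
          let diff := |rect_count - target|
          match s.1 with
          | none => (some diff, w * h)
          | some m => if diff < m then (some diff, w * h) else s)
        (min_diff, nearest_area)
      find_nearest_area_loop target ws st.1 st.2

def find_nearest_area (target : Int) : Int :=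
  find_nearest_area_loop target (PySem.List.pyRange 1 100 1) none 0

-- ===== PORT B =====
def tri (n : Int) : Int := PySem.Int.floordiv (n * (n + 1)) 2

-- the `while lo < hi` binary-search loop of Source B, step for step
def bsearchH (target tw lo hi : Int) : Int :=
  if hlt : lo < hi then
    if target ≤ tw * tri (PySem.Int.floordiv (lo + hi) 2) then
      bsearchH target tw lo (PySem.Int.floordiv (lo + hi) 2)
    else
      bsearchH target tw (PySem.Int.floordiv (lo + hi) 2 + 1) hi
  else lo
termination_by (hi - lo).toNat
decreasing_by
  · have h := PySem.Int.floordiv_eq_ediv_of_pos (a := lo + hi) (b := 2) (by omega)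
    rw [h]; omega
  · have h := PySem.Int.floordiv_eq_ediv_of_pos (a := lo + hi) (b := 2) (by omega)
    rw [h]; omega

-- outer `for w` loop of Source B: best_diff / best_area threaded as parameters
def find_nearest_area_alt_loop (target : Int) : List Int → Option Int → Int → Int
  | [], _, best_area => best_area
  | w :: ws, best_diff, best_area =>
      let tw := tri w
      let h0 := if tw * 4950 < target then (99 : Int) else bsearchH target tw 1 99
      let cands := if h0 = 1 then [h0] else [h0 - 1, h0]
      let st := cands.foldl (fun s h =>
          let diff := |tw * tri h - target|
          match s.1 with
          | none => (some diff, w * h)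
          | some m => if diff < m then (some diff, w * h) else s)
        (best_diff, best_area)
      find_nearest_area_alt_loop target ws st.1 st.2

def find_nearest_area_alt (target : Int) : Int :=
  find_nearest_area_alt_loop target (PySem.List.pyRange 1 100 1) none 0

-- ===== PRECONDITION & SPEC =====
def Spec_find_nearest_area (target : Int) (out : Int) : Prop := out = find_nearest_area_alt target
instance (target : Int) (out : Int) : Decidable (Spec_find_nearest_area target out) := by unfold Spec_find_nearest_area; infer_instance

-- ===== CLAIM (what is proved, stated in full; the proofs are below) =====
def Claim_equal_find_nearest_area : Prop := ∀ (target : Int), Dom_find_nearest_area target → Spec_find_nearest_area target (find_nearest_area target)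

-- ===== LEMMAS AND PROOFS =====

-- generic first-strict-minimum update step shared by both ports' inner folds
def gstep (d a : Int → Int) (s : Option Int × Int) (h : Int) : Option Int × Int :=
  match s.1 with
  | none => (some (d h), a h)
  | some m => if d h < m then (some (d h), a h) else s

lemma tri_eq (n : Int) : 2 * tri n = n * (n + 1) := by
  obtain ⟨k, hk⟩ := Int.even_mul_succ_self n
  have h : n * (n + 1) = 2 * k := by omega
  simp [tri, h, PySem.Int.floordiv, Int.mul_fdiv_cancel_left]

lemma cr_eq (w h : Int) : count_rectangles w h = tri w * tri h := by
  have hw := tri_eq w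
  have hh := tri_eq h
  have h4 : w * (w + 1) * h * (h + 1) = 4 * (tri w * tri h) := by
    linear_combination (-(h * (h + 1))) * hw + (-(2 * tri w)) * hh
  simp [count_rectangles, h4, PySem.Int.floordiv, Int.mul_fdiv_cancel_left]

lemma tri_pos {n : Int} (hn : 1 ≤ n) : 1 ≤ tri n := by
  have := tri_eq n; nlinarith

lemma tri_mono {x y : Int} (hx : 1 ≤ x) (hxy : x < y) : tri x < tri y := by
  have hx' := tri_eq x; have hy' := tri_eq y; nlinarith

lemma C_mono {tw x y : Int} (htw : 1 ≤ tw) (hx : 1 ≤ x) (hxy : x < y) :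
    tw * tri x < tw * tri y :=
  mul_lt_mul_of_pos_left (tri_mono hx hxy) (by omega)

-- binary search returns the least element of [lo,hi] satisfying the (monotone) predicate
lemma bsearchH_spec (target tw : Int) :
    ∀ n lo hi, (hi - lo).toNat = n → lo ≤ hi → target ≤ tw * tri hi →
    (∀ x y, lo ≤ x → x ≤ y → y ≤ hi → target ≤ tw * tri x → target ≤ tw * tri y) →
    lo ≤ bsearchH target tw lo hi ∧ bsearchH target tw lo hi ≤ hi ∧
    target ≤ tw * tri (bsearchH target tw lo hi) ∧
    (∀ x, lo ≤ x → x < bsearchH target tw lo hi → ¬ target ≤ tw * tri x) := by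
  intro n
  induction n using Nat.strong_induction_on with
  | _ n ih =>
    intro lo hi hn hle hhi hmono
    rw [bsearchH]
    by_cases hlt : lo < hi
    · simp only [hlt, dif_pos]
      have hmid : PySem.Int.floordiv (lo + hi) 2 = (lo + hi) / 2 :=
        PySem.Int.floordiv_eq_ediv_of_pos (by omega)
      have hb1 : lo ≤ PySem.Int.floordiv (lo + hi) 2 := by rw [hmid]; omega
      have hb2 : PySem.Int.floordiv (lo + hi) 2 < hi := by rw [hmid]; omega
      by_cases hp : target ≤ tw * tri (PySem.Int.floordiv (lo + hi) 2)
      · simp only [hp, if_pos]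
        have hrec := ih (PySem.Int.floordiv (lo + hi) 2 - lo).toNat (by omega)
          lo (PySem.Int.floordiv (lo + hi) 2) rfl hb1 hp
          (fun x y h1 h2 h3 h4 => hmono x y h1 h2 (by omega) h4)
        exact ⟨hrec.1, by omega, hrec.2.2.1, hrec.2.2.2⟩
      · simp only [hp, if_neg, not_false_iff]
        have hrec := ih (hi - (PySem.Int.floordiv (lo + hi) 2 + 1)).toNat (by omega)
          (PySem.Int.floordiv (lo + hi) 2 + 1) hi rfl (by omega) hhi
          (fun x y h1 h2 h3 h4 => hmono x y (by omega) h2 h3 h4)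
        refine ⟨by omega, hrec.2.1, hrec.2.2.1, ?_⟩
        intro x hx1 hx2 hx3
        by_cases hxm : PySem.Int.floordiv (lo + hi) 2 + 1 ≤ x
        · exact hrec.2.2.2 x hxm hx2 hx3
        · exact hp (hmono x (PySem.Int.floordiv (lo + hi) 2) hx1 (by omega) (by omega) hx3)
    · simp only [hlt, dif_neg, not_false_iff]
      have heq : lo = hi := by omega
      subst heq
      exact ⟨le_refl _, le_refl _, hhi, by omega⟩

-- the h0 that B computes: least h in [1,99] reaching target, or 99 if none does
lemma h0_facts (t tw : Int) (htw1 : 1 ≤ tw) :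
    1 ≤ (if tw * 4950 < t then (99 : Int) else bsearchH t tw 1 99) ∧
    (if tw * 4950 < t then (99 : Int) else bsearchH t tw 1 99) ≤ 99 ∧
    (∀ x, 1 ≤ x → x < (if tw * 4950 < t then (99 : Int) else bsearchH t tw 1 99) →
      tw * tri x < t) ∧
    (t ≤ tw * tri (if tw * 4950 < t then (99 : Int) else bsearchH t tw 1 99) ∨
      ((if tw * 4950 < t then (99 : Int) else bsearchH t tw 1 99) = 99 ∧ tw * tri 99 < t)) := by
  have htri99 : tri 99 = 4950 := by decide
  by_cases hbig : tw * 4950 < t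
  · rw [if_pos hbig]
    refine ⟨by omega, le_refl _, ?_, Or.inr ⟨rfl, by rw [htri99]; omega⟩⟩
    intro x hx1 hx2
    have h := C_mono htw1 hx1 (show x < 99 by omega)
    rw [htri99] at h; omega
  · rw [if_neg hbig]
    have hhi : t ≤ tw * tri 99 := by rw [htri99]; omega
    have hs := bsearchH_spec t tw (99 - 1 : Int).toNat 1 99 rfl (by omega) hhi
      (fun x y h1 h2 h3 h4 => by
        rcases eq_or_lt_of_le h2 with h | h
        · rw [← h]; exact h4
        · exact le_of_lt (lt_of_le_of_lt h4 (C_mono htw1 (by omega) h)))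
    exact ⟨hs.1, hs.2.1, fun x hx1 hx2 => by
      have h := hs.2.2.2 x hx1 hx2; omega, Or.inl hs.2.2.1⟩

-- fold facts about gstep -------------------------------------------------

lemma gstep_fst_ub (d a : Int → Int) (s : Option Int × Int) (c : Int) :
    ∃ m, (gstep d a s c).1 = some m ∧ m ≤ d c := by
  rcases s with ⟨fst, snd⟩
  cases fst with
  | none => exact ⟨d c, rfl, le_refl _⟩
  | some m =>
    by_cases h : d c < m
    · exact ⟨d c, by simp [gstep, h], le_refl _⟩
    · exact ⟨m, by simp [gstep, h], by omega⟩

lemma gfold_no_update (d a : Int → Int) :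
    ∀ (L : List Int) (s : Option Int × Int) (m : Int), s.1 = some m →
    (∀ h ∈ L, ¬ d h < m) → L.foldl (gstep d a) s = s := by
  intro L
  induction L with
  | nil => intro s m _ _; rfl
  | cons x xs ih =>
    intro s m hm hall
    have hstep : gstep d a s x = s := by
      rcases s with ⟨fst, snd⟩
      simp only at hm; subst hm
      simp [gstep, hall x (by simp)]
    rw [List.foldl_cons, hstep]
    exact ih s m hm (fun h hh => hall h (by simp [hh]))

lemma gfold_fst_mono (d a : Int → Int) :
    ∀ (L : List Int) (s : Option Int × Int) (m : Int), s.1 = some m →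
    ∃ m', (L.foldl (gstep d a) s).1 = some m' ∧ m' ≤ m := by
  intro L
  induction L with
  | nil => intro s m hm; exact ⟨m, hm, le_refl _⟩
  | cons x xs ih =>
    intro s m hm
    rcases s with ⟨fst, snd⟩
    simp only at hm; subst hm
    by_cases h : d x < m
    · obtain ⟨m', h1, h2⟩ := ih (gstep d a (some m, snd) x) (d x) (by simp [gstep, h])
      exact ⟨m', by simpa using h1, by omega⟩
    · obtain ⟨m', h1, h2⟩ := ih (gstep d a (some m, snd) x) m (by simp [gstep, h])
      exact ⟨m', by simpa using h1, h2⟩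

lemma gfold_cases (d a : Int → Int) :
    ∀ (L : List Int) (s : Option Int × Int),
    L.foldl (gstep d a) s = s ∨ ∃ h ∈ L, (L.foldl (gstep d a) s).1 = some (d h) := by
  intro L
  induction L with
  | nil => intro s; exact Or.inl rfl
  | cons x xs ih =>
    intro s
    by_cases hs : gstep d a s x = s
    · rcases ih s with h | ⟨h, hmem, hfst⟩
      · exact Or.inl (by rw [List.foldl_cons, hs, h])
      · exact Or.inr ⟨h, by simp [hmem], by rw [List.foldl_cons, hs]; exact hfst⟩
    · have hfst : (gstep d a s x).1 = some (d x) := by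
        rcases s with ⟨fst, snd⟩
        cases fst with
        | none => rfl
        | some m =>
          by_cases h : d x < m
          · simp [gstep, h]
          · exact absurd (by simp [gstep, h]) hs
      rcases ih (gstep d a s x) with h | ⟨h, hmem, hfst'⟩
      · exact Or.inr ⟨x, by simp, by rw [List.foldl_cons, h]; exact hfst⟩
      · exact Or.inr ⟨h, by simp [hmem], by rw [List.foldl_cons]; exact hfst'⟩

-- a prefix whose diffs all exceed d c cannot influence the step at c
lemma gskip_prefix (d a : Int → Int) (P : List Int) (c : Int) (s : Option Int × Int)
    (hP : ∀ h ∈ P, d c < d h) :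
    gstep d a (P.foldl (gstep d a) s) c = gstep d a s c := by
  rcases gfold_cases d a P s with h | ⟨h1, hmem, hfst⟩
  · rw [h]
  · have hdc : d c < d h1 := hP h1 hmem
    have hupd : gstep d a (P.foldl (gstep d a) s) c = (some (d c), a c) := by
      rcases hfold : P.foldl (gstep d a) s with ⟨fst, snd⟩
      rw [hfold] at hfst; simp only at hfst; subst hfst
      simp [gstep, hdc]
    rw [hupd]
    rcases s with ⟨fst, snd⟩
    cases fst with
    | none => rfl
    | some m =>
      obtain ⟨m', hm', hle⟩ := gfold_fst_mono d a P (some m, snd) m rfl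
      have heq : d h1 = m' := Option.some.inj (hfst.symm.trans hm')
      have hlt : d c < m := by omega
      simp [gstep, hlt]

-- the inner linear scan over h = 1..99 equals B's two-candidate fold
lemma inner_eq (t tw w h0 : Int) (htw1 : 1 ≤ tw)
    (hlo : 1 ≤ h0) (hhi : h0 ≤ 99)
    (hbelow : ∀ x, 1 ≤ x → x < h0 → tw * tri x < t)
    (habove : t ≤ tw * tri h0 ∨ (h0 = 99 ∧ tw * tri 99 < t))
    (s : Option Int × Int) :
    (PySem.List.pyRange 1 100 1).foldl
      (gstep (fun h => |tw * tri h - t|) (fun h => w * h)) s =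
    (if h0 = 1 then [h0] else [h0 - 1, h0]).foldl
      (gstep (fun h => |tw * tri h - t|) (fun h => w * h)) s := by
  set d : Int → Int := fun h => |tw * tri h - t| with hd
  set a : Int → Int := fun h => w * h with ha
  have dlt_below : ∀ x y, 1 ≤ x → x < y → y < h0 → d y < d x := by
    intro x y hx hxy hy
    have h1 := hbelow x hx (by omega)
    have h2 := hbelow y (by omega) hy
    have h3 := C_mono htw1 hx hxy
    rw [hd]; simp only
    rw [abs_of_neg (by omega), abs_of_neg (by omega)]; omega
  have dlt_above : ∀ y, h0 < y → t ≤ tw * tri h0 → d h0 < d y := by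
    intro y hy hp
    have h3 := C_mono htw1 (by omega) hy
    rw [hd]; simp only
    rw [abs_of_nonneg (by omega), abs_of_nonneg (by omega)]; omega
  by_cases h01 : h0 = 1
  · subst h01
    have hp : t ≤ tw * tri 1 := by
      rcases habove with h | ⟨h99, _⟩
      · exact h
      · omega
    have hsplit : PySem.List.pyRange 1 100 1 = 1 :: PySem.List.pyRange 2 100 1 :=
      PySem.List.pyRange_one_cons (by omega)
    rw [hsplit, List.foldl_cons]
    rw [if_pos rfl]; simp only [List.foldl_cons, List.foldl_nil]
    obtain ⟨m, hm, hmle⟩ := gstep_fst_ub d a s 1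
    exact gfold_no_update d a _ _ m hm (fun h hh => by
      have hmem := PySem.List.mem_pyRange_one.1 hh
      have h2 := dlt_above h (by omega) hp
      omega)
  · have h02 : 2 ≤ h0 := by omega
    have hsplit1 : PySem.List.pyRange 1 100 1 =
        PySem.List.pyRange 1 (h0 - 1) 1 ++ PySem.List.pyRange (h0 - 1) 100 1 :=
      PySem.List.pyRange_one_append 1 (h0 - 1) 100 (by omega) (by omega)
    have hsplit2 : PySem.List.pyRange (h0 - 1) 100 1 =
        (h0 - 1) :: PySem.List.pyRange h0 100 1 := by
      rw [PySem.List.pyRange_one_cons (by omega)]; ring_nf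
    have hsplit3 : PySem.List.pyRange h0 100 1 =
        h0 :: PySem.List.pyRange (h0 + 1) 100 1 :=
      PySem.List.pyRange_one_cons (by omega)
    rw [hsplit1, List.foldl_append, hsplit2, List.foldl_cons,
      gskip_prefix d a _ (h0 - 1) s (fun h hh => by
        have hmem := PySem.List.mem_pyRange_one.1 hh
        exact dlt_below h (h0 - 1) (by omega) (by omega) (by omega)),
      hsplit3, List.foldl_cons]
    obtain ⟨m, hm, hmle⟩ := gstep_fst_ub d a (gstep d a s (h0 - 1)) h0
    have hrest : (PySem.List.pyRange (h0 + 1) 100 1).foldl (gstep d a)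
        (gstep d a (gstep d a s (h0 - 1)) h0) =
        gstep d a (gstep d a s (h0 - 1)) h0 := by
      rcases habove with hp | ⟨h99, _⟩
      · exact gfold_no_update d a _ _ m hm (fun h hh => by
          have hmem := PySem.List.mem_pyRange_one.1 hh
          have h2 := dlt_above h (by omega) hp
          omega)
      · rw [h99, PySem.List.pyRange_one_eq_nil (by omega)]; rfl
    rw [hrest]
    simp only [if_neg h01, List.foldl_cons, List.foldl_nil]

lemma loop_eq (t : Int) : ∀ (ws : List Int) (md : Option Int) (nr : Int),
    (∀ w ∈ ws, 1 ≤ w) →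
    find_nearest_area_loop t ws md nr = find_nearest_area_alt_loop t ws md nr := by
  intro ws
  induction ws with
  | nil => intro md nr _; rfl
  | cons w rest ih =>
    intro md nr hmem
    have hw1 : 1 ≤ w := hmem w (by simp)
    have htw1 : 1 ≤ tri w := tri_pos hw1
    obtain ⟨hlo, hhi, hbelow, habove⟩ := h0_facts t (tri w) htw1
    have hst : (PySem.List.pyRange 1 100 1).foldl (fun s h =>
          let rect_count := count_rectangles w h
          let diff := |rect_count - t|
          match s.1 with
          | none => (some diff, w * h)
          | some m => if diff < m then (some diff, w * h) else s)
        (md, nr) =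
        (if (if tri w * 4950 < t then (99 : Int) else bsearchH t (tri w) 1 99) = 1
          then [(if tri w * 4950 < t then (99 : Int) else bsearchH t (tri w) 1 99)]
          else [(if tri w * 4950 < t then (99 : Int) else bsearchH t (tri w) 1 99) - 1,
                (if tri w * 4950 < t then (99 : Int) else bsearchH t (tri w) 1 99)]).foldl
          (fun s h =>
            let diff := |tri w * tri h - t|
            match s.1 with
            | none => (some diff, w * h)
            | some m => if diff < m then (some diff, w * h) else s)
          (md, nr) := by
      refine Eq.trans (PySem.List.foldl_congr_mem _ _
        (gstep (fun h => |tri w * tri h - t|) (fun h => w * h)) (md, nr)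
        (fun acc' x _ => by simp only [cr_eq]; rfl)) ?_
      refine Eq.trans (inner_eq t (tri w) w
        (if tri w * 4950 < t then (99 : Int) else bsearchH t (tri w) 1 99)
        htw1 hlo hhi hbelow habove (md, nr)) ?_
      exact PySem.List.foldl_congr_mem _ _ _ (md, nr) (fun acc' x _ => rfl)
    simp only [find_nearest_area_loop, find_nearest_area_alt_loop]
    rw [hst]
    exact ih _ _ (fun x hx => hmem x (by simp [hx]))

-- ===== VERDICT (by name: the statement is the Claim_ definition above) =====
theorem find_nearest_area_spec : Claim_equal_find_nearest_area := by
  intro target _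
  show find_nearest_area target = find_nearest_area_alt target
  exact loop_eq target (PySem.List.pyRange 1 100 1) none 0
    (fun w hw => (PySem.List.mem_pyRange_one.1 hw).1)
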